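-- pv_equiv track=rewrite | github.com/bssrdf/pyleet | RemoveStonestoMinimizetheTotal.py | minStoneSum
-- ===== SOURCE A (Python) =====
-- import heapq
-- from typing import List
-- from math import floor
--
-- def minStoneSum(piles: List[int], k: int) -> int:
--     ans = 0
--     pq = []
--     for p in piles:
--         heapq.heappush(pq, -p)
--     while k > 0:
--         p = -1*heapq.heappop(pq)
--         p -= floor(p/2)
--         if p > 0:
--            heapq.heappush(pq, -p)
--         k -= 1
--     while pq:
--         ans += -1*heapq.heappop(pq)
--     return ans
-- ===== SOURCE B (Python) =====
-- def minStoneSum(piles, k):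
--     stones = list(piles)
--     for _ in range(k):
--         i = stones.index(max(stones))
--         p = stones[i] - stones[i] // 2
--         if p > 0:
--             stones[i] = p
--         else:
--             stones.pop(i)
--     return sum(stones)
-- ===== Notes on version B (the rewrite author's own statement) =====
-- stated objective: simpler
-- what changed: Replaces the max-heap of negated values (push all, pop/halve/re-push k times, then a draining pop loop) by a plain list that is scanned linearly for its maximum k times and updated in place, then summed.
import Mathlib
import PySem

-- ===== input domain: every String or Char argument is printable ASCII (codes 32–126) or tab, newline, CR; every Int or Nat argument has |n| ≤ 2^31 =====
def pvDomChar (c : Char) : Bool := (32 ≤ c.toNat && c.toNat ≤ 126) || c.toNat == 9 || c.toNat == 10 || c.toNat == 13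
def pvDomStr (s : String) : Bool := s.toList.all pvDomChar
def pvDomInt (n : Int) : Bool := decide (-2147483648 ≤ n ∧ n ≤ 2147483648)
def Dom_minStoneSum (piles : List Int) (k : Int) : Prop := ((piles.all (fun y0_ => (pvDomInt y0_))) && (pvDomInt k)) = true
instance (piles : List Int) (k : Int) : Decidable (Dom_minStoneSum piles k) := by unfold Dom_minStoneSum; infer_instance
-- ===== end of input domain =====

-- B replaces A's max-heap (push/pop/halve/re-push, then a draining pop loop) by a plain
-- list scanned linearly for its maximum k times and updated in place (simpler, not faster).


-- ===== PORT A =====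
-- heapq is a standard-library priority queue; it is ported by its exact observable
-- semantics on Int elements: heappush adds an element, heappop removes and returns the
-- minimum.  Since the elements are plain integers, equal elements are indistinguishable,
-- so this is exact for every value A computes.
def pvHeapPush (pq : List Int) (x : Int) : List Int := x :: pq

-- one iteration of A's 'while k > 0' body; heappop on an empty heap raises IndexError
-- (excluded by Pre_), the 'none' branch is junk.  floor(p/2) on these magnitudes
-- (|p| ≤ 2^31 < 2^53, and p only shrinks) is exactly integer floor division, ported as
-- PySem.Int.floordiv.
def pvAStep (pq : List Int) : List Int :=
  match pq.min? with
  | none => pq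
  | some m =>
    let p := -1 * m
    let p' := p - PySem.Int.floordiv p 2
    if p' > 0 then pvHeapPush (pq.erase m) (-p') else pq.erase m

def pvALoop : Nat → List Int → List Int
  | 0, pq => pq
  | n + 1, pq => pvALoop n (pvAStep pq)

-- A's final 'while pq: ans += -heappop(pq)' loop; each pop removes exactly one element,
-- so the loop runs exactly pq.length times — that length is passed as structural fuel.
def pvDrain : Nat → List Int → Int
  | 0, _ => 0
  | fuel + 1, pq =>
    match pq.min? with
    | none => 0
    | some m => -1 * m + pvDrain fuel (pq.erase m)

def minStoneSum (piles : List Int) (k : Int) : Int :=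
  let pq := pvALoop k.toNat (piles.foldl (fun pq p => pvHeapPush pq (-1 * p)) [])
  pvDrain pq.length pq

-- ===== PORT B =====
-- one iteration of B's 'for _ in range(k)' body; max() of an empty list raises ValueError
-- (excluded by Pre_), the 'none' branch is junk.  stones[i] with i = stones.index(max(stones))
-- is the maximum m itself; stones.pop(i) at that index is List.eraseIdx.
def pvBStep (stones : List Int) : List Int :=
  match stones.max? with
  | none => stones
  | some m =>
    let i := stones.idxOf m
    let p := m - PySem.Int.floordiv m 2
    if p > 0 then stones.set i p else stones.eraseIdx i

def pvBLoop : Nat → List Int → List Int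
  | 0, stones => stones
  | n + 1, stones => pvBLoop n (pvBStep stones)

def minStoneSum_alt (piles : List Int) (k : Int) : Int :=
  (pvBLoop k.toNat piles).sum

-- ===== PRECONDITION & SPEC =====
-- Pre_ excludes exactly the inputs on which A raises (heappop/max on an emptied pile
-- list): with no positive pile each operation removes one pile, so the list empties and
-- the k-th operation raises iff k exceeds the number of piles.
def Pre_minStoneSum (piles : List Int) (k : Int) : Prop :=
  (∃ p ∈ piles, 0 < p) ∨ k ≤ (piles.length : Int)
instance (piles : List Int) (k : Int) : Decidable (Pre_minStoneSum piles k) := by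
  unfold Pre_minStoneSum; infer_instance

def pvWitness_minStoneSum : List Int × Int := ([5, 2], 3)

def Spec_minStoneSum (piles : List Int) (k : Int) (out : Int) : Prop := out = minStoneSum_alt piles k
instance (piles : List Int) (k : Int) (out : Int) : Decidable (Spec_minStoneSum piles k out) := by
  unfold Spec_minStoneSum; infer_instance

-- ===== CLAIM (what is proved, stated in full; the proofs are below) =====
def Claim_equal_minStoneSum : Prop := ∀ (piles : List Int) (k : Int), Dom_minStoneSum piles k → Pre_minStoneSum piles k → Spec_minStoneSum piles k (minStoneSum piles k)

-- ===== LEMMAS AND PROOFS =====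

-- B's in-place update of the first maximum occurrence is, up to permutation, 'erase it and cons the new value'.
theorem pv_set_idxOf_perm (l : List Int) (m v : Int) (hm : m ∈ l) :
    (l.set (l.idxOf m) v).Perm (v :: l.erase m) := by
  induction l with
  | nil => cases hm
  | cons a t ih =>
    by_cases ham : a = m
    · subst ham
      simp
    · have hmt : m ∈ t := by
        cases hm with
        | head => exact absurd rfl ham
        | tail _ h => exact h
      have hba : (a == m) = false := beq_false_of_ne ham
      simp only [List.idxOf_cons, hba, cond_false, List.set_cons_succ, List.erase_cons]
      exact ((ih hmt).cons a).trans (List.Perm.swap v a _)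

-- the invariant: A's heap is a permutation of the negated stone list, one step
theorem pv_step_inv (pq stones : List Int) (hperm : pq.Perm (stones.map (fun x => -x))) :
    (pvAStep pq).Perm ((pvBStep stones).map (fun x => -x)) := by
  cases hmax : stones.max? with
  | none =>
    have hnil : stones = [] := List.max?_eq_none_iff.mp hmax
    subst hnil
    have : pq = [] := by simpa using hperm
    simp [pvAStep, pvBStep, this]
  | some m =>
    obtain ⟨hmmem, hmub⟩ := List.max?_eq_some_iff.mp hmax
    have hminpq : pq.min? = some (-m) := by
      rw [List.min?_eq_some_iff]
      constructor
      · exact hperm.mem_iff.mpr (List.mem_map.mpr ⟨m, hmmem, rfl⟩)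
      · intro b hb
        obtain ⟨x, hx, rfl⟩ := List.mem_map.mp (hperm.mem_iff.mp hb)
        have := hmub x hx
        omega
    have herase : (stones.erase m).map (fun x => -x) = (stones.map (fun x => -x)).erase (-m) :=
      List.map_erase neg_injective stones
    have heraseperm : (pq.erase (-m)).Perm ((stones.erase m).map (fun x => -x)) := by
      rw [herase]; exact hperm.erase (-m)
    simp only [pvAStep, hminpq, pvBStep, hmax, neg_mul, one_mul, neg_neg]
    by_cases hp : m - PySem.Int.floordiv m 2 > 0
    · rw [if_pos hp, if_pos hp]
      have hB := (pv_set_idxOf_perm stones m (m - PySem.Int.floordiv m 2) hmmem).map (fun x : Int => -x)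
      simp only [List.map_cons] at hB
      rw [herase] at hB
      exact (((hperm.erase (-m)).cons _).trans hB.symm)
    · rw [if_neg hp, if_neg hp]
      rw [← List.erase_eq_eraseIdx_of_idxOf rfl]
      exact heraseperm

theorem pv_loop_inv (n : Nat) (pq stones : List Int) (hperm : pq.Perm (stones.map (fun x => -x))) :
    (pvALoop n pq).Perm ((pvBLoop n stones).map (fun x => -x)) := by
  induction n generalizing pq stones with
  | zero => exact hperm
  | succ n ih => exact ih _ _ (pv_step_inv pq stones hperm)

theorem pv_drain_eq (fuel : Nat) (pq : List Int) (h : pq.length ≤ fuel) : pvDrain fuel pq = -pq.sum := by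
  induction fuel generalizing pq with
  | zero =>
    have : pq = [] := List.eq_nil_of_length_eq_zero (by omega)
    subst this; rfl
  | succ n ih =>
    cases hmin : pq.min? with
    | none =>
      rw [List.min?_eq_none_iff] at hmin
      subst hmin; rfl
    | some m =>
      have hmem : m ∈ pq := (List.min?_eq_some_iff.mp hmin).1
      have hlen := List.length_erase_of_mem hmem
      have hsum := List.sum_erase hmem
      have hlenpos : 0 < pq.length := List.length_pos_of_mem hmem
      simp only [pvDrain, hmin]
      rw [ih (pq.erase m) (by omega)]
      omega

theorem pv_build_perm_aux (piles acc : List Int) :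
    (piles.foldl (fun pq p => pvHeapPush pq (-1 * p)) acc).Perm (piles.map (fun x => -x) ++ acc) := by
  induction piles generalizing acc with
  | nil => simp
  | cons a t ih =>
    simp only [List.foldl_cons, List.map_cons, pvHeapPush]
    have h2 : ((t.map (fun x => -x)) ++ ((-1 * a) :: acc)).Perm ((-a) :: (t.map (fun x => -x) ++ acc)) := by
      simp [List.perm_middle]
    exact (ih ((-1 * a) :: acc)).trans h2

theorem pv_build_perm (piles : List Int) :
    (piles.foldl (fun pq p => pvHeapPush pq (-1 * p)) []).Perm (piles.map (fun x => -x)) := by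
  simpa using pv_build_perm_aux piles []

-- ===== VERDICT (by name: the statement is the Claim_ definition above) =====
theorem minStoneSum_spec : Claim_equal_minStoneSum := by
  intro piles k _hdom _hpre
  show minStoneSum piles k = minStoneSum_alt piles k
  unfold minStoneSum minStoneSum_alt
  have hloop := pv_loop_inv k.toNat _ piles (pv_build_perm piles)
  rw [pv_drain_eq _ _ (le_refl _), hloop.sum_eq, ← List.sum_neg]
  omega
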